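-- pv_equiv track=rewrite | github.com/dletk/COMP380-Spring-2018 | hw4/DStarLite.py | findIncorrectNeighbors
-- ===== SOURCE A (Python) =====
-- def findIncorrectNeighbors(correctInfo, row, col, wid, hgt):
--     """Takes in the dictionary of correct information, along
--     with a row and column of a cell in the occupancy grid, and the size
--     of the occupancy grid. It checks if any of the nine cells centered
--     on row and col are incorrect. If so, they, along with the correct
--     information, are added to the dictionary. That dictionary is returned."""
--     bads = {}
--     for r in [row - 1, row, row + 1]:
--         for c in [col - 1, col, col + 1]:
--             if (r >= 0) and (r < wid) and (c >= 0) and (c < hgt):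
--                 if (r, c) in correctInfo:
--                     bads[r, c] = correctInfo[r, c]
--                     del correctInfo[r, c]
--     return bads
-- ===== SOURCE B (Python) =====
-- def findIncorrectNeighbors(correctInfo, row, col, wid, hgt):
--     """One pass over the dictionary: select the entries whose key lies in the
--     3x3 box centered on (row, col) AND inside the grid bounds, delete them
--     from correctInfo (same mutation as the original), and return them as a
--     dict ordered by key."""
--     picked = [(key, val) for key, val in correctInfo.items()
--               if abs(key[0] - row) <= 1 and abs(key[1] - col) <= 1
--               and 0 <= key[0] < wid and 0 <= key[1] < hgt]
--     for key, _ in picked: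
--         del correctInfo[key]
--     picked.sort(key=lambda kv: kv[0])
--     return dict(picked)
-- ===== Notes on version B (the rewrite author's own statement) =====
-- stated objective: alternative
-- what changed: Instead of probing the 9 candidate cells of the 3x3 box against the dict, B makes one pass over the dict selecting entries inside the box and the grid bounds, deletes them, and returns them ordered by key; A is O(1) dict probing per call, B scans the whole dict, so B trades a different traversal (data scan + sort of at most 9 hits) for A's candidate generation.
import Mathlib
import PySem

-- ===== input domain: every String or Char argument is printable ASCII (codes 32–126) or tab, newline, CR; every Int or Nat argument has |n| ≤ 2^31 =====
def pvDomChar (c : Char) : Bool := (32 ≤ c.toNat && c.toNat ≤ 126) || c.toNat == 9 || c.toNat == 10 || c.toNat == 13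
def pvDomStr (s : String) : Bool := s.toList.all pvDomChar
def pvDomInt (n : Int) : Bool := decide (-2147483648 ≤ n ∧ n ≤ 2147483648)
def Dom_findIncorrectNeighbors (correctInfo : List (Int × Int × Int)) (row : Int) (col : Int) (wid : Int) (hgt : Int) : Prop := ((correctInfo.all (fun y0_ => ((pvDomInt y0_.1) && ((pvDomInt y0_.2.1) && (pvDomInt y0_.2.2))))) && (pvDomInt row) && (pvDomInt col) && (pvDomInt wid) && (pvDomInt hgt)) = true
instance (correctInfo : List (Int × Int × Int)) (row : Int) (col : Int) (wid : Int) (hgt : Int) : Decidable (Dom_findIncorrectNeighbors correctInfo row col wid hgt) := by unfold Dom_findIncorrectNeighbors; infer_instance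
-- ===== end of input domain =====

-- B selects the qualifying entries in ONE pass over the dict (instead of probing the 9
-- candidate cells) and returns them ordered by key; both A and B delete the selected keys
-- from correctInfo in place (same mutation) — the equivalence proved here is about the
-- RETURN value.

-- ===== PORT A =====
-- '(r, c) in correctInfo' / 'correctInfo[r, c]': first (here: unique) matching key
def lookupRC : List (Int × Int × Int) → Int → Int → Option Int
  | [], _, _ => none
  | (a, b, v) :: t, r, c => if a = r ∧ b = c then some v else lookupRC t r c

-- 'del correctInfo[r, c]': remove the (unique) entry with that key
def delRC : List (Int × Int × Int) → Int → Int → List (Int × Int × Int)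
  | [], _, _ => []
  | (a, b, v) :: t, r, c => if a = r ∧ b = c then t else (a, b, v) :: delRC t r c

-- the body of the two nested 'for' loops; state = (correctInfo, bads)
def stepA (wid hgt : Int) (st : List (Int × Int × Int) × List (Int × Int × Int))
    (rc : Int × Int) : List (Int × Int × Int) × List (Int × Int × Int) :=
  if rc.1 ≥ 0 ∧ rc.1 < wid ∧ rc.2 ≥ 0 ∧ rc.2 < hgt then
    match lookupRC st.1 rc.1 rc.2 with
    | some v => (delRC st.1 rc.1 rc.2, st.2 ++ [(rc.1, rc.2, v)])
    | none => st
  else st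

def findIncorrectNeighbors (correctInfo : List (Int × Int × Int)) (row : Int) (col : Int) (wid : Int) (hgt : Int) : List (Int × Int × Int) :=
  (([row - 1, row, row + 1].foldl (fun st r =>
      [col - 1, col, col + 1].foldl (fun st c => stepA wid hgt st (r, c)) st)
    (correctInfo, []))).2

-- ===== PORT B =====
def findIncorrectNeighbors_alt (correctInfo : List (Int × Int × Int)) (row : Int) (col : Int) (wid : Int) (hgt : Int) : List (Int × Int × Int) :=
  let picked := correctInfo.filter (fun t =>
    decide (|t.1 - row| ≤ 1 ∧ |t.2.1 - col| ≤ 1 ∧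
            0 ≤ t.1 ∧ t.1 < wid ∧ 0 ≤ t.2.1 ∧ t.2.1 < hgt))
  -- 'picked.sort(key=lambda kv: kv[0])': Python compares the (r, c) key tuples
  -- lexicographically, which is exactly '<' on Lex (Int × Int)
  PySem.List.sorted picked (fun t => toLex (t.1, t.2.1))

-- ===== PRECONDITION & SPEC =====
-- The Python argument is a dict, whose keys are necessarily distinct; Pre_ states just that
-- for the association-list encoding (it excludes no input representable as a Python dict).
def Pre_findIncorrectNeighbors (correctInfo : List (Int × Int × Int)) (row : Int) (col : Int) (wid : Int) (hgt : Int) : Prop :=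
  (correctInfo.map (fun t => (t.1, t.2.1))).Nodup
instance (correctInfo : List (Int × Int × Int)) (row : Int) (col : Int) (wid : Int) (hgt : Int) : Decidable (Pre_findIncorrectNeighbors correctInfo row col wid hgt) := by unfold Pre_findIncorrectNeighbors; infer_instance

def pvWitness_findIncorrectNeighbors : (List (Int × Int × Int)) × Int × Int × Int × Int :=
  ([(0, 0, 5), (1, 1, 7), (4, 4, 9)], 0, 0, 3, 3)

def Spec_findIncorrectNeighbors (correctInfo : List (Int × Int × Int)) (row : Int) (col : Int) (wid : Int) (hgt : Int) (out : List (Int × Int × Int)) : Prop := out = findIncorrectNeighbors_alt correctInfo row col wid hgt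
instance (correctInfo : List (Int × Int × Int)) (row : Int) (col : Int) (wid : Int) (hgt : Int) (out : List (Int × Int × Int)) : Decidable (Spec_findIncorrectNeighbors correctInfo row col wid hgt out) := by unfold Spec_findIncorrectNeighbors; infer_instance

-- ===== CLAIM (what is proved, stated in full; the proofs are below) =====
def Claim_equal_findIncorrectNeighbors : Prop := ∀ (correctInfo : List (Int × Int × Int)) (row : Int) (col : Int) (wid : Int) (hgt : Int), Dom_findIncorrectNeighbors correctInfo row col wid hgt → Pre_findIncorrectNeighbors correctInfo row col wid hgt → Spec_findIncorrectNeighbors correctInfo row col wid hgt (findIncorrectNeighbors correctInfo row col wid hgt)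

-- ===== LEMMAS AND PROOFS =====

-- the 9 cells A probes, in A's scan order (lexicographic)
def cellsOf (row col : Int) : List (Int × Int) :=
  [(row - 1, col - 1), (row - 1, col), (row - 1, col + 1),
   (row, col - 1), (row, col), (row, col + 1),
   (row + 1, col - 1), (row + 1, col), (row + 1, col + 1)]

-- what A contributes at one probed cell, relative to the ORIGINAL dict
def probeA (info : List (Int × Int × Int)) (wid hgt : Int) (rc : Int × Int) :
    Option (Int × Int × Int) :=
  if rc.1 ≥ 0 ∧ rc.1 < wid ∧ rc.2 ≥ 0 ∧ rc.2 < hgt then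
    (lookupRC info rc.1 rc.2).map (fun v => (rc.1, rc.2, v))
  else none

theorem lookupRC_delRC (d : List (Int × Int × Int)) (r c r' c' : Int)
    (h : ¬(r' = r ∧ c' = c)) : lookupRC (delRC d r c) r' c' = lookupRC d r' c' := by
  induction d with
  | nil => rfl
  | cons hd t ih =>
    obtain ⟨a, b, v⟩ := hd
    by_cases hab : a = r ∧ b = c
    · rw [show delRC ((a, b, v) :: t) r c = t from by simp [delRC, hab]]
      have hne : ¬(a = r' ∧ b = c') := by
        rintro ⟨rfl, rfl⟩; exact h ⟨hab.1, hab.2⟩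
      rw [show lookupRC ((a, b, v) :: t) r' c' = lookupRC t r' c' from by
        simp [lookupRC, hne]]
    · rw [show delRC ((a, b, v) :: t) r c = (a, b, v) :: delRC t r c from by
        simp [delRC, hab]]
      show (if a = r' ∧ b = c' then some v else lookupRC (delRC t r c) r' c') = _
      rw [ih]
      rfl

theorem lookupRC_eq_some_iff (d : List (Int × Int × Int)) (r c v : Int)
    (hnd : (d.map (fun t => (t.1, t.2.1))).Nodup) :
    lookupRC d r c = some v ↔ (r, c, v) ∈ d := by
  induction d with
  | nil => simp [lookupRC]
  | cons hd t ih =>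
    obtain ⟨a, b, w⟩ := hd
    simp only [List.map_cons, List.nodup_cons] at hnd
    by_cases hab : a = r ∧ b = c
    · obtain ⟨rfl, rfl⟩ := hab
      rw [show lookupRC ((a, b, w) :: t) a b = some w from by simp [lookupRC]]
      simp only [Option.some.injEq, List.mem_cons, Prod.mk.injEq, true_and]
      constructor
      · rintro rfl; exact Or.inl rfl
      · rintro (rfl | hmem)
        · rfl
        · exact absurd (List.mem_map_of_mem (f := fun t => (t.1, t.2.1)) hmem) hnd.1
    · rw [show lookupRC ((a, b, w) :: t) r c = lookupRC t r c from by simp [lookupRC, hab]]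
      rw [ih hnd.2]
      simp only [List.mem_cons, Prod.mk.injEq]
      constructor
      · exact Or.inr
      · rintro (⟨rfl, rfl, rfl⟩ | hmem)
        · exact absurd ⟨rfl, rfl⟩ hab
        · exact hmem

theorem probeA_eq_some_iff (info : List (Int × Int × Int)) (wid hgt : Int)
    (rc : Int × Int) (a : Int × Int × Int) :
    probeA info wid hgt rc = some a ↔
      (rc.1 ≥ 0 ∧ rc.1 < wid ∧ rc.2 ≥ 0 ∧ rc.2 < hgt) ∧
      ∃ v, lookupRC info rc.1 rc.2 = some v ∧ a = (rc.1, rc.2, v) := by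
  unfold probeA
  split
  · rename_i hb
    simp only [Option.map_eq_some_iff, hb, true_and]
    constructor
    · rintro ⟨v, hv, rfl⟩; exact ⟨v, hv, rfl⟩
    · rintro ⟨v, hv, rfl⟩; exact ⟨v, hv, rfl⟩
  · rename_i hb
    simp [hb]

theorem probeA_delRC (info : List (Int × Int × Int)) (wid hgt r c : Int) (x : Int × Int)
    (h : ¬(x.1 = r ∧ x.2 = c)) :
    probeA (delRC info r c) wid hgt x = probeA info wid hgt x := by
  unfold probeA
  rw [lookupRC_delRC info r c x.1 x.2 h]

-- the fold over any duplicate-free cell list, described against the ORIGINAL dict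
theorem foldl_stepA (wid hgt : Int) (cs : List (Int × Int)) :
    ∀ (info bads : List (Int × Int × Int)), cs.Nodup →
    (cs.foldl (stepA wid hgt) (info, bads)).2 = bads ++ cs.filterMap (probeA info wid hgt) := by
  induction cs with
  | nil => intro info bads _; simp
  | cons rc cs ih =>
    intro info bads hnd
    rw [List.nodup_cons] at hnd
    rw [List.foldl_cons, List.filterMap_cons]
    by_cases hb : rc.1 ≥ 0 ∧ rc.1 < wid ∧ rc.2 ≥ 0 ∧ rc.2 < hgt
    · cases hlk : lookupRC info rc.1 rc.2 with
      | none =>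
        rw [show stepA wid hgt (info, bads) rc = (info, bads) from by
          simp [stepA, hb, hlk]]
        rw [show probeA info wid hgt rc = none from by simp [probeA, hb, hlk]]
        exact ih info bads hnd.2
      | some v =>
        rw [show stepA wid hgt (info, bads) rc =
            (delRC info rc.1 rc.2, bads ++ [(rc.1, rc.2, v)]) from by
          simp [stepA, hb, hlk]]
        rw [show probeA info wid hgt rc = some (rc.1, rc.2, v) from by
          simp [probeA, hb, hlk]]
        rw [ih (delRC info rc.1 rc.2) (bads ++ [(rc.1, rc.2, v)]) hnd.2]
        rw [List.filterMap_congr (g := probeA info wid hgt) ?_]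
        · simp
        · intro x hx
          refine probeA_delRC info wid hgt rc.1 rc.2 x ?_
          rintro ⟨h1, h2⟩
          exact hnd.1 ((show x = rc from Prod.ext_iff.mpr ⟨h1, h2⟩) ▸ hx)
    · rw [show stepA wid hgt (info, bads) rc = (info, bads) from by simp [stepA, hb]]
      rw [show probeA info wid hgt rc = none from by simp [probeA, hb]]
      exact ih info bads hnd.2

theorem nodup_cellsOf (row col : Int) : (cellsOf row col).Nodup := by
  simp [cellsOf, Prod.ext_iff]; omega

theorem mem_cellsOf (row col r c : Int) :
    (r, c) ∈ cellsOf row col ↔ |r - row| ≤ 1 ∧ |c - col| ≤ 1 := by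
  simp only [cellsOf, List.mem_cons, List.not_mem_nil, or_false, Prod.mk.injEq, abs_le]
  omega

theorem findIncorrectNeighbors_eq_filterMap (info : List (Int × Int × Int))
    (row col wid hgt : Int) :
    findIncorrectNeighbors info row col wid hgt =
      (cellsOf row col).filterMap (probeA info wid hgt) := by
  have h : findIncorrectNeighbors info row col wid hgt =
      ((cellsOf row col).foldl (stepA wid hgt) (info, [])).2 := rfl
  rw [h, foldl_stepA wid hgt _ info [] (nodup_cellsOf row col), List.nil_append]

theorem pairwise_cellsOf (row col : Int) :
    (cellsOf row col).Pairwise (fun p q => toLex p < toLex q) := by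
  simp only [cellsOf, List.pairwise_cons, List.mem_cons,
    List.not_mem_nil, or_false, Prod.Lex.toLex_lt_toLex]
  refine ⟨?_, ?_, ?_, ?_, ?_, ?_, ?_, ?_, fun a' h => h.elim, List.Pairwise.nil⟩ <;>
    (rintro p (rfl | rfl | rfl | rfl | rfl | rfl | rfl | rfl | rfl) <;> simp)

theorem findIncorrectNeighbors_spec' (info : List (Int × Int × Int)) (row col wid hgt : Int)
    (hnd : (info.map (fun t => (t.1, t.2.1))).Nodup) :
    findIncorrectNeighbors info row col wid hgt =
      findIncorrectNeighbors_alt info row col wid hgt := by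
  rw [findIncorrectNeighbors_eq_filterMap]
  show _ = PySem.List.sorted _ _
  have hpair : ((cellsOf row col).filterMap (probeA info wid hgt)).Pairwise
      (fun a b : Int × Int × Int => toLex (a.1, a.2.1) < toLex (b.1, b.2.1)) := by
    rw [List.pairwise_filterMap]
    refine (pairwise_cellsOf row col).imp ?_
    intro p q hpq a ha b hb
    obtain ⟨-, va, -, rfl⟩ := (probeA_eq_some_iff info wid hgt p a).mp ha
    obtain ⟨-, vb, -, rfl⟩ := (probeA_eq_some_iff info wid hgt q b).mp hb
    simpa using hpq
  have hnodupL : ((cellsOf row col).filterMap (probeA info wid hgt)).Nodup :=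
    hpair.imp (fun h => by rintro rfl; exact lt_irrefl _ h)
  have hnodupR : (info.filter (fun t =>
      decide (|t.1 - row| ≤ 1 ∧ |t.2.1 - col| ≤ 1 ∧
              0 ≤ t.1 ∧ t.1 < wid ∧ 0 ≤ t.2.1 ∧ t.2.1 < hgt))).Nodup :=
    (List.Nodup.of_map _ hnd).filter _
  have hperm : ((cellsOf row col).filterMap (probeA info wid hgt)).Perm
      (info.filter (fun t =>
        decide (|t.1 - row| ≤ 1 ∧ |t.2.1 - col| ≤ 1 ∧
                0 ≤ t.1 ∧ t.1 < wid ∧ 0 ≤ t.2.1 ∧ t.2.1 < hgt))) := by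
    rw [List.perm_ext_iff_of_nodup hnodupL hnodupR]
    intro t
    obtain ⟨r, c, v⟩ := t
    simp only [List.mem_filterMap, List.mem_filter, decide_eq_true_eq]
    constructor
    · rintro ⟨rc, hrc, hprobe⟩
      obtain ⟨hbnd, w, hw, heq⟩ := (probeA_eq_some_iff info wid hgt rc _).mp hprobe
      obtain ⟨rc1, rc2⟩ := rc
      obtain ⟨rfl, rfl, rfl⟩ := Prod.mk.injEq .. ▸ heq
      rw [mem_cellsOf] at hrc
      exact ⟨(lookupRC_eq_some_iff info _ _ _ hnd).mp hw, hrc.1, hrc.2,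
        hbnd.1, hbnd.2.1, hbnd.2.2.1, hbnd.2.2.2⟩
    · rintro ⟨hmem, hbox1, hbox2, hbnd⟩
      refine ⟨(r, c), (mem_cellsOf row col r c).mpr ⟨hbox1, hbox2⟩, ?_⟩
      rw [probeA_eq_some_iff]
      exact ⟨⟨hbnd.1, hbnd.2.1, hbnd.2.2.1, hbnd.2.2.2⟩,
        v, (lookupRC_eq_some_iff info r c v hnd).mpr hmem, rfl⟩
  exact (PySem.List.sorted_eq_of_perm_of_pairwise_lt _ _
    (fun t : Int × Int × Int => toLex (t.1, t.2.1)) hperm hpair).symm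

-- ===== VERDICT (by name: the statement is the Claim_ definition above) =====
theorem findIncorrectNeighbors_spec : Claim_equal_findIncorrectNeighbors := by
  intro info row col wid hgt _ hpre
  exact findIncorrectNeighbors_spec' info row col wid hgt hpre
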